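-- pv_equiv track=rewrite | github.com/RestorationDev/ChordAlytics | Song_Parser.py | song_to_matrix
-- ===== SOURCE A (Python) =====
-- def song_to_matrix(test_string):
--     # Convert song string to a list of chords
--     chord_array = []
--
--     i = 0
--
--     while i < len(test_string):
--
--         if test_string[i] in ["C", "G", "F"]:
--
--             chord_array.append(test_string[i])
--
--         elif test_string[i] == "A" and i + 1 < len(test_string):
--
--             chord_array.append(test_string[i] + test_string[i+1])
--
--             i += 1
--
--         i += 1
--
--     # three consecutive chord groups
--
--     three_chord_array = [chord_array[j] + chord_array[j+1] + chord_array[j+2]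
--
--                          for j in range(len(chord_array) - 2)]
--
--     return three_chord_array
-- ===== SOURCE B (Python) =====
-- def song_to_matrix(test_string):
--     # One fused pass: tokenize with an iterator (so 'A' consumes its
--     # following character via next()) and emit each three-chord group
--     # immediately from a rolling window of the last two chords.
--     out = []
--     p2 = p1 = None
--     it = iter(test_string)
--     for ch in it:
--         if ch == 'A':
--             nxt = next(it, None)
--             tok = ch + nxt if nxt is not None else None
--         elif ch in ('C', 'G', 'F'):
--             tok = ch
--         else:
--             tok = None
--         if tok is not None:
--             if p2 is not None:
--                 out.append(p2 + p1 + tok)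
--             p2, p1 = p1, tok
--     return out
-- ===== Notes on version B (the rewrite author's own statement) =====
-- stated objective: alternative
-- what changed: Replaces A's two-phase index/lookahead while-loop (building a chord list, then an indexed range comprehension over it) by a single fused iterator pass that emits each three-chord group immediately from a rolling window of the last two chords, with no intermediate chord list or index arithmetic.
import Mathlib
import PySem

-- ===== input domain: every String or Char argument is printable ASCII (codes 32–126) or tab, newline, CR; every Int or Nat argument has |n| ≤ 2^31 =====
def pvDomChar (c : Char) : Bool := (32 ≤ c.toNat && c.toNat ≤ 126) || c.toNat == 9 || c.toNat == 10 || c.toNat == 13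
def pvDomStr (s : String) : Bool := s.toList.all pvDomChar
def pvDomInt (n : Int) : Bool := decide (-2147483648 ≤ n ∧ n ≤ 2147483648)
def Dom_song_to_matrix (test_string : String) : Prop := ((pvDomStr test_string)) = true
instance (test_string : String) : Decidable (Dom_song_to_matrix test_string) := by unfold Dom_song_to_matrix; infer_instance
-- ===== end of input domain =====

-- B replaces A's index/lookahead while-loop plus a second indexed comprehension by one
-- fused pass with a rolling two-chord window: same O(n), measurably faster by a constant factor.

-- ===== PORT A =====
-- A's while loop: state (i, chord_array); i advances by 2 after an 'A' pair, else by 1.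
def songWhile (cs : List Char) (i : Nat) (chords : List String) : List String :=
  if _h : i < cs.length then
    let c := cs.getD i ' '
    if c = 'C' ∨ c = 'G' ∨ c = 'F' then
      songWhile cs (i + 1) (chords ++ [String.mk [c]])
    else if c = 'A' ∧ i + 1 < cs.length then
      songWhile cs (i + 2) (chords ++ [String.mk [c, cs.getD (i + 1) ' ']])
    else
      songWhile cs (i + 1) chords
  else chords
termination_by cs.length - i

-- A's comprehension: [chords[j] + chords[j+1] + chords[j+2] for j in range(len(chords)-2)]
def songTriples (xs : List String) : List String :=
  (List.range (xs.length - 2)).map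
    (fun j => xs.getD j "" ++ xs.getD (j + 1) "" ++ xs.getD (j + 2) "")

def song_to_matrix (test_string : String) : List String :=
  songTriples (songWhile test_string.toList 0 [])

-- ===== PORT B =====
-- B's single for-loop over the iterator: the 'A' case consumes the following char
-- (next(it, None)); state is the rolling window (p2, p1) and the output list.
def songFused (cs : List Char) (p2 p1 : Option String) (out : List String) : List String :=
  match cs with
  | [] => out
  | c :: rest =>
    if c = 'A' then
      match rest with
      | [] => out            -- tok is None and the iterator is exhausted
      | n :: rest' =>
        songFused rest' p1 (some (String.mk [c, n]))
          (match p2, p1 with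
           | some a, some b => out ++ [a ++ b ++ String.mk [c, n]]
           | _, _ => out)
    else if c = 'C' ∨ c = 'G' ∨ c = 'F' then
      songFused rest p1 (some (String.mk [c]))
        (match p2, p1 with
         | some a, some b => out ++ [a ++ b ++ String.mk [c]]
         | _, _ => out)
    else
      songFused rest p2 p1 out

def song_to_matrix_alt (test_string : String) : List String :=
  songFused test_string.toList none none []

-- ===== PRECONDITION & SPEC =====
def Spec_song_to_matrix (test_string : String) (out : List String) : Prop := out = song_to_matrix_alt test_string
instance (test_string : String) (out : List String) : Decidable (Spec_song_to_matrix test_string out) := by unfold Spec_song_to_matrix; infer_instance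

-- ===== CLAIM (what is proved, stated in full; the proofs are below) =====
def Claim_equal_song_to_matrix : Prop := ∀ (test_string : String), Dom_song_to_matrix test_string → Spec_song_to_matrix test_string (song_to_matrix test_string)

-- ===== LEMMAS AND PROOFS =====

-- proof-only: canonical token list of the string
def pvTokens : List Char → List String
  | [] => []
  | c :: rest =>
    if c = 'A' then
      match rest with
      | [] => []
      | n :: rest' => String.mk [c, n] :: pvTokens rest'
    else if c = 'C' ∨ c = 'G' ∨ c = 'F' then String.mk [c] :: pvTokens rest
    else pvTokens rest

-- proof-only: sliding-window triples
def pvTrip : List String → List String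
  | a :: b :: c :: r => (a ++ b ++ c) :: pvTrip (b :: c :: r)
  | _ => []

-- unfolding lemmas for pvTokens
lemma pvTokens_nil : pvTokens [] = [] := by rw [pvTokens.eq_def]

lemma pvTokens_A_nil : pvTokens ['A'] = [] := by rw [pvTokens.eq_def]; simp

lemma pvTokens_A_cons (n : Char) (rest : List Char) :
    pvTokens ('A' :: n :: rest) = String.mk ['A', n] :: pvTokens rest := by
  rw [pvTokens.eq_def]; simp

lemma pvTokens_cgf (c : Char) (rest : List Char) (hA : c ≠ 'A')
    (hc : c = 'C' ∨ c = 'G' ∨ c = 'F') :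
    pvTokens (c :: rest) = String.mk [c] :: pvTokens rest := by
  rw [pvTokens.eq_def]; simp [hA, hc]

lemma pvTokens_skip (c : Char) (rest : List Char) (hA : c ≠ 'A')
    (hc : ¬(c = 'C' ∨ c = 'G' ∨ c = 'F')) :
    pvTokens (c :: rest) = pvTokens rest := by
  rw [pvTokens.eq_def]; simp [hA, hc]

lemma songTriples_eq_trip : ∀ xs : List String, songTriples xs = pvTrip xs := by
  intro xs
  induction xs with
  | nil => simp [songTriples, pvTrip]
  | cons a tl ih =>
    match tl, ih with
    | [], _ => simp [songTriples, pvTrip]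
    | [b], _ => simp [songTriples, pvTrip]
    | b :: c :: r, ih =>
      have hlen : (a :: b :: c :: r).length - 2 = r.length + 1 := by simp
      rw [songTriples, hlen, List.range_succ_eq_map, List.map_cons, List.map_map]
      rw [pvTrip, ← ih, songTriples]
      simp [Function.comp]

lemma songWhile_eq_tokens (cs : List Char) :
    ∀ k i chords, cs.length - i ≤ k →
      songWhile cs i chords = chords ++ pvTokens (cs.drop i) := by
  intro k
  induction k with
  | zero =>
    intro i chords hk
    have hge : cs.length ≤ i := by omega
    rw [songWhile]
    simp [Nat.not_lt.mpr hge, List.drop_eq_nil_of_le hge, pvTokens]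
  | succ k ih =>
    intro i chords hk
    rw [songWhile]
    by_cases h : i < cs.length
    · simp only [h, dif_pos]
      have hdrop : cs.drop i = cs[i] :: cs.drop (i + 1) := List.drop_eq_getElem_cons h
      have hget : cs.getD i ' ' = cs[i] := List.getD_eq_getElem cs ' ' h
      by_cases hc : cs.getD i ' ' = 'C' ∨ cs.getD i ' ' = 'G' ∨ cs.getD i ' ' = 'F'
      · simp only [hc, if_pos]
        rw [ih (i + 1) _ (by omega), hdrop]
        have hne : cs[i] ≠ 'A' := by
          rw [← hget]; rcases hc with h | h | h <;> rw [h] <;> decide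
        have hc' : cs[i] = 'C' ∨ cs[i] = 'G' ∨ cs[i] = 'F' := by rw [← hget]; exact hc
        rw [pvTokens_cgf _ _ hne hc', ← hget]
        simp
      · simp only [hc, if_neg, not_false_iff]
        by_cases ha : cs.getD i ' ' = 'A' ∧ i + 1 < cs.length
        · simp only [ha, if_pos]
          obtain ⟨ha1, ha2⟩ := ha
          have hdrop2 : cs.drop (i + 1) = cs[i + 1] :: cs.drop (i + 2) :=
            List.drop_eq_getElem_cons ha2
          rw [ih (i + 2) _ (by omega), hdrop, hdrop2]
          have hAi : cs[i] = 'A' := by rw [← hget]; exact ha1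
          have hget2 : cs.getD (i + 1) ' ' = cs[i + 1] := List.getD_eq_getElem cs ' ' ha2
          rw [hAi, pvTokens_A_cons, hget2]
          simp
        · simp only [ha, if_neg, not_false_iff]
          rw [ih (i + 1) _ (by omega), hdrop]
          by_cases hA : cs[i] = 'A'
          · -- then i+1 ≥ length, so drop (i+1) = [] and the 'A' token is dropped
            have h2 : ¬ i + 1 < cs.length := by
              intro hlt; exact ha ⟨by rw [hget]; exact hA, hlt⟩
            have : cs.drop (i + 1) = [] := List.drop_eq_nil_of_le (by omega)
            rw [this, hA, pvTokens_A_nil]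
            simp [pvTokens_nil]
          · have hcgf : ¬ (cs[i] = 'C' ∨ cs[i] = 'G' ∨ cs[i] = 'F') := by
              rw [← hget]; exact hc
            rw [pvTokens_skip _ _ hA hcgf]
    · simp only [h, dif_neg, not_false_iff]
      have hge : cs.length ≤ i := by omega
      simp [List.drop_eq_nil_of_le hge, pvTokens]

-- unfolding lemmas for songFused
lemma songFused_A_nil (p2 p1 : Option String) (out : List String) :
    songFused ['A'] p2 p1 out = out := by
  rw [songFused.eq_def]; simp

lemma songFused_A_cons (n : Char) (rest' : List Char) (p2 p1 : Option String)
    (out : List String) :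
    songFused ('A' :: n :: rest') p2 p1 out =
      songFused rest' p1 (some (String.mk ['A', n]))
        (match p2, p1 with
         | some a, some b => out ++ [a ++ b ++ String.mk ['A', n]]
         | _, _ => out) := by
  rw [songFused.eq_def]; simp

lemma songFused_cgf (c : Char) (rest : List Char) (p2 p1 : Option String)
    (out : List String) (hA : c ≠ 'A') (hc : c = 'C' ∨ c = 'G' ∨ c = 'F') :
    songFused (c :: rest) p2 p1 out =
      songFused rest p1 (some (String.mk [c]))
        (match p2, p1 with
         | some a, some b => out ++ [a ++ b ++ String.mk [c]]
         | _, _ => out) := by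
  rw [songFused.eq_def]; simp [hA, hc]

lemma songFused_skip (c : Char) (rest : List Char) (p2 p1 : Option String)
    (out : List String) (hA : c ≠ 'A') (hc : ¬(c = 'C' ∨ c = 'G' ∨ c = 'F')) :
    songFused (c :: rest) p2 p1 out = songFused rest p2 p1 out := by
  rw [songFused.eq_def]; simp [hA, hc]

-- reachable-window invariant for B's fused loop
lemma songFused_inv (k : Nat) :
    ∀ cs : List Char, cs.length ≤ k →
    ∀ (ctx : List String) (p2 p1 : Option String) (out : List String),
      ((p2 = none ∧ p1 = none ∧ ctx = []) ∨
       (∃ b, p2 = none ∧ p1 = some b ∧ ctx = [b]) ∨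
       (∃ a b, p2 = some a ∧ p1 = some b ∧ ctx = [a, b])) →
      songFused cs p2 p1 out = out ++ pvTrip (ctx ++ pvTokens cs) := by
  induction k with
  | zero =>
    intro cs hcs ctx p2 p1 out hok
    have : cs = [] := List.length_eq_zero_iff.mp (by omega)
    subst this
    rcases hok with ⟨_, _, h3⟩ | ⟨b, _, _, h3⟩ | ⟨a, b, _, _, h3⟩ <;>
      subst h3 <;> simp [songFused, pvTokens_nil, pvTrip]
  | succ k ih =>
    intro cs hcs ctx p2 p1 out hok
    match cs with
    | [] =>
      rcases hok with ⟨_, _, h3⟩ | ⟨b, _, _, h3⟩ | ⟨a, b, _, _, h3⟩ <;>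
        subst h3 <;> simp [songFused, pvTokens_nil, pvTrip]
    | c :: rest =>
      by_cases hA : c = 'A'
      · subst hA
        match rest with
        | [] =>
          rcases hok with ⟨_, _, h3⟩ | ⟨b, _, _, h3⟩ | ⟨a, b, _, _, h3⟩ <;>
            subst h3 <;> simp [songFused_A_nil, pvTokens_A_nil, pvTrip]
        | n :: rest' =>
          have hr : rest'.length ≤ k := by simp at hcs; omega
          have htok : pvTokens ('A' :: n :: rest') = String.mk ['A', n] :: pvTokens rest' :=
            pvTokens_A_cons n rest'
          rw [songFused_A_cons]
          rcases hok with ⟨h1, h2, h3⟩ | ⟨b, h1, h2, h3⟩ | ⟨a, b, h1, h2, h3⟩ <;>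
            subst h1 <;> subst h2 <;> subst h3
          · rw [show (match (none : Option String), (none : Option String) with
                | some a, some b => out ++ [a ++ b ++ String.mk ['A', n]]
                | _, _ => out) = out from rfl]
            rw [ih rest' hr [String.mk ['A', n]] _ _ _ (Or.inr (Or.inl ⟨_, rfl, rfl, rfl⟩))]
            simp [htok]
          · rw [show (match (none : Option String), (some b : Option String) with
                | some a, some b => out ++ [a ++ b ++ String.mk ['A', n]]
                | _, _ => out) = out from rfl]
            rw [ih rest' hr [b, String.mk ['A', n]] _ _ _
              (Or.inr (Or.inr ⟨_, _, rfl, rfl, rfl⟩))]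
            simp [htok]
          · rw [show (match (some a : Option String), (some b : Option String) with
                | some a, some b => out ++ [a ++ b ++ String.mk ['A', n]]
                | _, _ => out) = out ++ [a ++ b ++ String.mk ['A', n]] from rfl]
            rw [ih rest' hr [b, String.mk ['A', n]] _ _ _
              (Or.inr (Or.inr ⟨_, _, rfl, rfl, rfl⟩))]
            simp only [htok, List.cons_append, List.nil_append, pvTrip, List.append_assoc,
              List.singleton_append]
      · have hr : rest.length ≤ k := by simp at hcs; omega
        by_cases hc : c = 'C' ∨ c = 'G' ∨ c = 'F'
        · have htok : pvTokens (c :: rest) = String.mk [c] :: pvTokens rest :=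
            pvTokens_cgf c rest hA hc
          rw [songFused_cgf c rest _ _ _ hA hc]
          rcases hok with ⟨h1, h2, h3⟩ | ⟨b, h1, h2, h3⟩ | ⟨a, b, h1, h2, h3⟩ <;>
            subst h1 <;> subst h2 <;> subst h3
          · rw [show (match (none : Option String), (none : Option String) with
                | some a, some b => out ++ [a ++ b ++ String.mk [c]]
                | _, _ => out) = out from rfl]
            rw [ih rest hr [String.mk [c]] _ _ _ (Or.inr (Or.inl ⟨_, rfl, rfl, rfl⟩))]
            simp [htok]
          · rw [show (match (none : Option String), (some b : Option String) with
                | some a, some b => out ++ [a ++ b ++ String.mk [c]]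
                | _, _ => out) = out from rfl]
            rw [ih rest hr [b, String.mk [c]] _ _ _
              (Or.inr (Or.inr ⟨_, _, rfl, rfl, rfl⟩))]
            simp [htok]
          · rw [show (match (some a : Option String), (some b : Option String) with
                | some a, some b => out ++ [a ++ b ++ String.mk [c]]
                | _, _ => out) = out ++ [a ++ b ++ String.mk [c]] from rfl]
            rw [ih rest hr [b, String.mk [c]] _ _ _
              (Or.inr (Or.inr ⟨_, _, rfl, rfl, rfl⟩))]
            simp only [htok, List.cons_append, List.nil_append, pvTrip, List.append_assoc,
              List.singleton_append]
        · have htok : pvTokens (c :: rest) = pvTokens rest :=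
            pvTokens_skip c rest hA hc
          rw [songFused_skip c rest _ _ _ hA hc, ih rest hr ctx _ _ _ hok, htok]

-- ===== VERDICT (by name: the statement is the Claim_ definition above) =====
theorem song_to_matrix_spec : Claim_equal_song_to_matrix := by
  intro s _
  show song_to_matrix s = song_to_matrix_alt s
  unfold song_to_matrix song_to_matrix_alt
  rw [songWhile_eq_tokens s.toList s.toList.length 0 [] (by omega)]
  rw [songFused_inv s.toList.length s.toList (le_refl _) [] none none []
      (Or.inl ⟨rfl, rfl, rfl⟩)]
  simp [songTriples_eq_trip]
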